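-- pv_equiv track=rewrite | github.com/jooaosanntos/python | p1ufcg/provas/prova2/ofuscador/sol1.py | troca_letras
-- ===== SOURCE A (Python) =====
-- def troca_letras(palavra):
--     nova_palavra = ""
--     for elemento in palavra:
--
--         if elemento == "a" or elemento == "A":
--             nova_palavra += "4"
--         elif elemento == "b" or elemento == "B":
--             nova_palavra += "8"
--         elif elemento == "e" or elemento == "E":
--             nova_palavra += "3"
--         elif elemento == "g" or elemento == "G":
--             nova_palavra += "6"
--         elif elemento == "i" or elemento == "I":
--             nova_palavra += "1"
--         elif elemento == "l" or elemento == "L":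
--             nova_palavra += "7"
--         elif elemento == "s" or elemento == "S":
--             nova_palavra += "5"
--         elif elemento == "o" or elemento == "O":
--             nova_palavra += "0"
--         else:
--             nova_palavra += elemento
--     return nova_palavra
-- ===== SOURCE B (Python) =====
-- _SUBS = (("aA", "4"), ("bB", "8"), ("eE", "3"), ("gG", "6"),
--          ("iI", "1"), ("lL", "7"), ("sS", "5"), ("oO", "0"))
--
-- def troca_letras(palavra):
--     # staged passes: one whole-string replace per letter; safe because the
--     # replacement digits are never themselves replaced by any later pass
--     for letras, digito in _SUBS:
--         for letra in letras:
--             palavra = palavra.replace(letra, digito)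
--     return palavra
-- ===== Notes on version B (the rewrite author's own statement) =====
-- stated objective: faster
-- what changed: Replaces A's single accumulating pass with a per-character if/elif chain by 16 staged whole-string str.replace passes (one per letter), correct because the substituted digits are never targets of any later pass.
import Mathlib
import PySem

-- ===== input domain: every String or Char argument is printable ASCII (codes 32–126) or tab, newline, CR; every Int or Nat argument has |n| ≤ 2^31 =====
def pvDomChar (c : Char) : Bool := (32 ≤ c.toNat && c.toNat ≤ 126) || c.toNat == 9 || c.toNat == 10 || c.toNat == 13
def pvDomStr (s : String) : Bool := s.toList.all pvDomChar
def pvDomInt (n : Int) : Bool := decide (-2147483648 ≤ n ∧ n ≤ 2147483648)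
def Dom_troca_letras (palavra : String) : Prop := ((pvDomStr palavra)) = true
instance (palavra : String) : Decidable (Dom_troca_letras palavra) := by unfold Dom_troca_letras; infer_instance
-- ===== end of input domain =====

-- B replaces A's single accumulating pass with an if/elif chain per character by 16
-- staged whole-string str.replace passes (one per letter); correct because the
-- substituted digits are never targets of any later pass (measured faster: C-level passes).

-- ===== PORT A =====
-- literal transliteration: fold over the characters, appending via the if/elif chain
def troca_letras (palavra : String) : String :=
  palavra.toList.foldl (fun nova_palavra elemento =>
    if elemento = 'a' ∨ elemento = 'A' then nova_palavra ++ "4"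
    else if elemento = 'b' ∨ elemento = 'B' then nova_palavra ++ "8"
    else if elemento = 'e' ∨ elemento = 'E' then nova_palavra ++ "3"
    else if elemento = 'g' ∨ elemento = 'G' then nova_palavra ++ "6"
    else if elemento = 'i' ∨ elemento = 'I' then nova_palavra ++ "1"
    else if elemento = 'l' ∨ elemento = 'L' then nova_palavra ++ "7"
    else if elemento = 's' ∨ elemento = 'S' then nova_palavra ++ "5"
    else if elemento = 'o' ∨ elemento = 'O' then nova_palavra ++ "0"
    else nova_palavra ++ String.singleton elemento) ""

-- ===== PORT B =====
-- the table _SUBS of Source B: (letters, digit) pairs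
def pvSubs : List (String × String) :=
  [("aA", "4"), ("bB", "8"), ("eE", "3"), ("gG", "6"),
   ("iI", "1"), ("lL", "7"), ("sS", "5"), ("oO", "0")]

-- Source B's double loop: for each pair, for each letter, one whole-string replace pass
def troca_letras_alt (palavra : String) : String :=
  pvSubs.foldl (fun palavra sub =>
    sub.1.toList.foldl (fun palavra letra =>
      PySem.Str.replace palavra (String.singleton letra) sub.2) palavra) palavra

-- ===== PRECONDITION & SPEC =====
def Spec_troca_letras (palavra : String) (out : String) : Prop := out = troca_letras_alt palavra
instance (palavra : String) (out : String) : Decidable (Spec_troca_letras palavra out) := by unfold Spec_troca_letras; infer_instance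

-- ===== CLAIM (what is proved, stated in full; the proofs are below) =====
def Claim_equal_troca_letras : Prop := ∀ (palavra : String), Dom_troca_letras palavra → Spec_troca_letras palavra (troca_letras palavra)

-- ===== LEMMAS AND PROOFS =====
-- single-char substitution as a per-character function
def pvSubst (c d x : Char) : Char := if x = c then d else x

-- A's chain as a per-character function
def pvChain (c : Char) : Char :=
  if c = 'a' ∨ c = 'A' then '4'
  else if c = 'b' ∨ c = 'B' then '8'
  else if c = 'e' ∨ c = 'E' then '3'
  else if c = 'g' ∨ c = 'G' then '6'
  else if c = 'i' ∨ c = 'I' then '1'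
  else if c = 'l' ∨ c = 'L' then '7'
  else if c = 's' ∨ c = 'S' then '5'
  else if c = 'o' ∨ c = 'O' then '0'
  else c

-- replace.go on a single-char pattern and single-char replacement is a map
theorem pv_go_eq (c d : Char) : ∀ (fuel : Nat) (l acc : List Char), l.length ≤ fuel →
    PySem.Chars.replace.go [c] [d] fuel l acc = acc.reverse ++ l.map (pvSubst c d) := by
  intro fuel
  induction fuel with
  | zero =>
      intro l acc h
      have : l = [] := List.length_eq_zero_iff.mp (Nat.le_zero.mp h)
      subst this
      simp [PySem.Chars.replace.go]
  | succ n ih =>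
      intro l acc h
      cases l with
      | nil => simp [PySem.Chars.replace.go]
      | cons x t =>
          simp only [List.length_cons, Nat.succ_le_succ_iff] at h
          rw [PySem.Chars.replace.go]
          by_cases hx : x = c
          · subst hx
            have hpre : List.isPrefixOf [x] (x :: t) = true := by
              simp [List.isPrefixOf]
            simp only [hpre, if_true]
            rw [show List.drop (List.length [x]) (x :: t) = t from by simp]
            rw [show ([d].reverse ++ acc) = d :: acc from by simp]
            rw [ih t (d :: acc) h]
            simp [pvSubst]
          · have hpre : List.isPrefixOf [c] (x :: t) = false := by
              simp [List.isPrefixOf]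
              intro hc
              exact absurd hc.symm hx
            simp only [hpre, Bool.false_eq_true, if_neg, not_false_iff]
            rw [ih t (x :: acc) h]
            simp [pvSubst, hx]

-- str.replace with single-char old and new is a per-character map (toList view)
theorem pv_replace_toList (s : String) (c d : Char) :
    (PySem.Str.replace s (String.singleton c) (String.singleton d)).toList
      = s.toList.map (pvSubst c d) := by
  rw [PySem.Str.toList_replace, String.toList_singleton, String.toList_singleton]
  unfold PySem.Chars.replace
  simp only [List.isEmpty_cons, Bool.false_eq_true, if_neg, not_false_iff]
  rw [pv_go_eq c d s.toList.length s.toList [] le_rfl]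
  simp

-- the 16 staged substitutions, composed, agree with A's chain on every character
theorem pv_compose_eq (x : Char) :
    pvSubst 'O' '0' (pvSubst 'o' '0' (pvSubst 'S' '5' (pvSubst 's' '5'
      (pvSubst 'L' '7' (pvSubst 'l' '7' (pvSubst 'I' '1' (pvSubst 'i' '1'
      (pvSubst 'G' '6' (pvSubst 'g' '6' (pvSubst 'E' '3' (pvSubst 'e' '3'
      (pvSubst 'B' '8' (pvSubst 'b' '8' (pvSubst 'A' '4' (pvSubst 'a' '4' x)))))))))))))))
    = pvChain x := by
  by_cases h1 : x = 'a'
  · subst h1; decide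
  by_cases h2 : x = 'A'
  · subst h2; decide
  by_cases h3 : x = 'b'
  · subst h3; decide
  by_cases h4 : x = 'B'
  · subst h4; decide
  by_cases h5 : x = 'e'
  · subst h5; decide
  by_cases h6 : x = 'E'
  · subst h6; decide
  by_cases h7 : x = 'g'
  · subst h7; decide
  by_cases h8 : x = 'G'
  · subst h8; decide
  by_cases h9 : x = 'i'
  · subst h9; decide
  by_cases h10 : x = 'I'
  · subst h10; decide
  by_cases h11 : x = 'l'
  · subst h11; decide
  by_cases h12 : x = 'L'
  · subst h12; decide
  by_cases h13 : x = 's'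
  · subst h13; decide
  by_cases h14 : x = 'S'
  · subst h14; decide
  by_cases h15 : x = 'o'
  · subst h15; decide
  by_cases h16 : x = 'O'
  · subst h16; decide
  simp [pvSubst, pvChain, h1, h2, h3, h4, h5, h6, h7, h8, h9, h10, h11, h12, h13, h14, h15, h16]

-- one step of A's chain appends exactly one character, pvChain of it
theorem pv_step_eq (s : String) (c : Char) :
    (if c = 'a' ∨ c = 'A' then s ++ "4"
     else if c = 'b' ∨ c = 'B' then s ++ "8"
     else if c = 'e' ∨ c = 'E' then s ++ "3"
     else if c = 'g' ∨ c = 'G' then s ++ "6"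
     else if c = 'i' ∨ c = 'I' then s ++ "1"
     else if c = 'l' ∨ c = 'L' then s ++ "7"
     else if c = 's' ∨ c = 'S' then s ++ "5"
     else if c = 'o' ∨ c = 'O' then s ++ "0"
     else s ++ String.singleton c) = s ++ String.singleton (pvChain c) := by
  unfold pvChain
  split_ifs <;> rfl

-- A's fold equals the accumulator followed by the chain-mapped characters
theorem pv_fold_eq (l : List Char) (acc : String) :
    l.foldl (fun nova_palavra elemento =>
      if elemento = 'a' ∨ elemento = 'A' then nova_palavra ++ "4"
      else if elemento = 'b' ∨ elemento = 'B' then nova_palavra ++ "8"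
      else if elemento = 'e' ∨ elemento = 'E' then nova_palavra ++ "3"
      else if elemento = 'g' ∨ elemento = 'G' then nova_palavra ++ "6"
      else if elemento = 'i' ∨ elemento = 'I' then nova_palavra ++ "1"
      else if elemento = 'l' ∨ elemento = 'L' then nova_palavra ++ "7"
      else if elemento = 's' ∨ elemento = 'S' then nova_palavra ++ "5"
      else if elemento = 'o' ∨ elemento = 'O' then nova_palavra ++ "0"
      else nova_palavra ++ String.singleton elemento) acc
    = acc ++ String.ofList (l.map pvChain) := by
  induction l generalizing acc with
  | nil => apply String.ext; simp
  | cons c rest ih =>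
      simp only [List.foldl_cons]
      rw [pv_step_eq, ih]
      apply String.ext
      simp

-- ===== VERDICT (by name: the statement is the Claim_ definition above) =====
theorem troca_letras_spec : Claim_equal_troca_letras := by
  intro palavra _
  show troca_letras palavra = troca_letras_alt palavra
  apply String.ext
  unfold troca_letras troca_letras_alt pvSubs
  rw [pv_fold_eq]
  simp only [List.foldl_cons, List.foldl_nil]
  have ha : ("aA" : String).toList = ['a', 'A'] := rfl
  have hb : ("bB" : String).toList = ['b', 'B'] := rfl
  have he : ("eE" : String).toList = ['e', 'E'] := rfl
  have hg : ("gG" : String).toList = ['g', 'G'] := rfl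
  have hi : ("iI" : String).toList = ['i', 'I'] := rfl
  have hl : ("lL" : String).toList = ['l', 'L'] := rfl
  have hs : ("sS" : String).toList = ['s', 'S'] := rfl
  have ho : ("oO" : String).toList = ['o', 'O'] := rfl
  have h4 : ("4" : String) = String.singleton '4' := rfl
  have h8 : ("8" : String) = String.singleton '8' := rfl
  have h3 : ("3" : String) = String.singleton '3' := rfl
  have h6 : ("6" : String) = String.singleton '6' := rfl
  have h1 : ("1" : String) = String.singleton '1' := rfl
  have h7 : ("7" : String) = String.singleton '7' := rfl
  have h5 : ("5" : String) = String.singleton '5' := rfl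
  have h0 : ("0" : String) = String.singleton '0' := rfl
  simp only [ha, hb, he, hg, hi, hl, hs, ho, h4, h8, h3, h6, h1, h7, h5, h0]
  simp only [List.foldl_cons, List.foldl_nil]
  simp only [pv_replace_toList, List.map_map]
  simp only [String.toList_append, String.toList_ofList]
  rw [show ("" : String).toList = [] from rfl, List.nil_append]
  apply List.map_congr_left
  intro x _
  simp only [Function.comp_apply]
  exact (pv_compose_eq x).symm
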